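-- pv_equiv track=rewrite | github.com/jjuraska/slug2slug | postprocessing.py | join_plural_nouns
-- ===== SOURCE A (Python) =====
-- def join_plural_nouns(utterance):
--     tokens = utterance.split()
--
--     utterance_new = ''
--     cur_pos = 0
--     while cur_pos < len(tokens):
--         if cur_pos < len(tokens) - 1 and tokens[cur_pos + 1] in ['-s', '-es']:
--             token_new = tokens[cur_pos] + tokens[cur_pos + 1].lstrip('-')
--             cur_pos += 2
--         else:
--             token_new = tokens[cur_pos]
--             cur_pos += 1
--
--         utterance_new += token_new + ' '
--
--     return utterance_new.strip()
-- ===== SOURCE B (Python) =====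
-- def join_plural_nouns(utterance):
--     result = []
--     can_absorb = True
--     for token in utterance.split():
--         if token in ('-s', '-es') and result and can_absorb:
--             result[-1] += token.lstrip('-')
--             can_absorb = False
--         else:
--             result.append(token)
--             can_absorb = True
--     return ' '.join(result)
-- ===== Notes on version B (the rewrite author's own statement) =====
-- stated objective: alternative
-- what changed: Replaces A's index-based lookahead loop (which inspects tokens[i+1] and consumes two tokens at a time, concatenating into a string that is finally strip()ed) by a single forward pass that back-merges a '-s'/'-es' token onto the previously emitted word, guarded by a can_absorb flag, and joins the result list.
import Mathlib
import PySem

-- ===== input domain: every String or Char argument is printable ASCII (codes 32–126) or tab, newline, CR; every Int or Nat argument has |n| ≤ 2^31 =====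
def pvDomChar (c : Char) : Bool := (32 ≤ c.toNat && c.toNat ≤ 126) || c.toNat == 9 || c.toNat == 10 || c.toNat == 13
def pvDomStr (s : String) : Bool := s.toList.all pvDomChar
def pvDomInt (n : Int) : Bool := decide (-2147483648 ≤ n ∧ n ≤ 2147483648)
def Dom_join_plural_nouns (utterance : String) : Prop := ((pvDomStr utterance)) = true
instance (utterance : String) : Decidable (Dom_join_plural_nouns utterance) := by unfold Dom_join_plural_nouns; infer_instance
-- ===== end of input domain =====

-- B replaces A's index-lookahead consume-two loop (string accumulation + final strip)
-- by a single back-merging pass with an absorb flag over a result list; same cost, different decomposition.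


-- hand port of Python's s.lstrip('-') (drop the longest prefix of '-' characters); exact
def lstripDash (s : String) : String := String.ofList (s.toList.dropWhile (· == '-'))

-- ===== PORT A =====
-- the while loop over cur_pos, transcribed as recursion on the remaining token list (cursor suffix)
def aLoop : List String → String → String
  | [], acc => acc
  | [t], acc => acc ++ (t ++ " ")
  | t :: t2 :: rest, acc =>
    if t2 == "-s" || t2 == "-es" then aLoop rest (acc ++ (t ++ lstripDash t2 ++ " "))
    else aLoop (t2 :: rest) (acc ++ (t ++ " "))

def join_plural_nouns (utterance : String) : String :=
  PySem.Str.strip (aLoop (PySem.Str.split₀ utterance) "")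

-- ===== PORT B =====
-- B's for-loop; the result list is kept reversed (head = last appended word), reversed at the end
def bLoop : List String → List String → Bool → List String
  | [], res, _ => res
  | t :: rest, [], _ => bLoop rest [t] true
  | t :: rest, r :: rs, can =>
    if (t == "-s" || t == "-es") && can then bLoop rest ((r ++ lstripDash t) :: rs) false
    else bLoop rest (t :: r :: rs) true

def join_plural_nouns_alt (utterance : String) : String :=
  PySem.Str.join " " (bLoop (PySem.Str.split₀ utterance) [] true).reverse

-- ===== PRECONDITION & SPEC =====
def Spec_join_plural_nouns (utterance : String) (out : String) : Prop := out = join_plural_nouns_alt utterance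
instance (utterance : String) (out : String) : Decidable (Spec_join_plural_nouns utterance out) := by unfold Spec_join_plural_nouns; infer_instance

-- ===== CLAIM (what is proved, stated in full; the proofs are below) =====
def Claim_equal_join_plural_nouns : Prop := ∀ (utterance : String), Dom_join_plural_nouns utterance → Spec_join_plural_nouns utterance (join_plural_nouns utterance)

-- ===== LEMMAS AND PROOFS =====

-- common specification: the merged word list (A's pairing structure)
def fm : List String → List String
  | [] => []
  | [t] => [t]
  | t :: t2 :: rest =>
    if t2 == "-s" || t2 == "-es" then (t ++ lstripDash t2) :: fm rest
    else t :: fm (t2 :: rest)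

-- A's accumulated string, as a char list: each word followed by one space
def jspL : List String → List Char
  | [] => []
  | w :: ws => w.toList ++ ' ' :: jspL ws

def GoodW (w : String) : Prop := w.toList ≠ [] ∧ ∀ c ∈ w.toList, PySem.Chars.isspace c = false

lemma bLoop_cons_cons (t : String) (rest : List String) (r : String) (rs : List String) (can : Bool) :
    bLoop (t :: rest) (r :: rs) can =
      if (t == "-s" || t == "-es") && can then bLoop rest ((r ++ lstripDash t) :: rs) false
      else bLoop rest (t :: r :: rs) true := rfl

lemma aLoop_eq : ∀ (ts : List String) (acc : String),
    (aLoop ts acc).toList = acc.toList ++ jspL (fm ts) := by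
  intro ts
  induction ts using fm.induct with
  | case1 => intro acc; simp [aLoop, fm, jspL]
  | case2 t => intro acc; simp [aLoop, fm, jspL]
  | case3 t t2 rest h ih =>
    intro acc
    simp only [aLoop, fm, if_pos h, ih]
    simp [jspL]
  | case4 t t2 rest h ih =>
    intro acc
    simp only [aLoop, fm, if_neg h, ih]
    simp [jspL]

lemma bLoop_eq : ∀ (n : Nat) (ts : List String), ts.length ≤ n →
    (∀ rs, (bLoop ts rs false).reverse = rs.reverse ++ fm ts) ∧
    (∀ r rs, (bLoop ts (r :: rs) true).reverse = rs.reverse ++ fm (r :: ts)) := by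
  intro n
  induction n with
  | zero =>
    intro ts hts
    have : ts = [] := List.length_eq_zero_iff.mp (Nat.le_zero.mp hts)
    subst this
    constructor
    · intro rs; simp [bLoop, fm]
    · intro r rs; simp [bLoop, fm]
  | succ n ih =>
    intro ts hts
    match ts with
    | [] =>
      constructor
      · intro rs; simp [bLoop, fm]
      · intro r rs; simp [bLoop, fm]
    | t :: rest =>
      have hlen : rest.length ≤ n := by simpa using hts
      constructor
      · intro rs
        match rs with
        | [] =>
          have := (ih rest hlen).2 t []
          simpa [bLoop] using this
        | r :: rs' =>
          rw [bLoop_cons_cons, Bool.and_false, if_neg (by simp)]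
          exact (ih rest hlen).2 t (r :: rs')
      · intro r rs
        rw [bLoop_cons_cons, Bool.and_true]
        by_cases h : (t == "-s" || t == "-es") = true
        · rw [if_pos h]
          have := (ih rest hlen).1 ((r ++ lstripDash t) :: rs)
          rw [this]
          simp [fm, h]
        · rw [if_neg h]
          have := (ih rest hlen).2 t (r :: rs)
          rw [this]
          simp [fm, h]

lemma bLoop_top (ts : List String) : (bLoop ts [] true).reverse = fm ts := by
  match ts with
  | [] => simp [bLoop, fm]
  | t :: rest =>
    have := (bLoop_eq rest.length rest le_rfl).2 t []
    simpa [bLoop] using this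

-- split₀ produces nonempty, whitespace-free words
lemma go_good : ∀ (s cur : List Char) (acc : List (List Char)),
    (∀ c ∈ cur, PySem.Chars.isspace c = false) →
    (∀ w ∈ acc, w ≠ [] ∧ ∀ c ∈ w, PySem.Chars.isspace c = false) →
    ∀ w ∈ PySem.Chars.split₀.go s cur acc, w ≠ [] ∧ ∀ c ∈ w, PySem.Chars.isspace c = false := by
  intro s
  induction s with
  | nil =>
    intro cur acc hcur hacc w hw
    by_cases hc : cur.isEmpty = true
    · rw [PySem.Chars.split₀.go, if_pos hc] at hw
      exact hacc w (List.mem_reverse.mp hw)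
    · rw [PySem.Chars.split₀.go, if_neg hc] at hw
      rcases List.mem_cons.mp (List.mem_reverse.mp hw) with h | h
      · subst h
        refine ⟨by simpa [List.isEmpty_iff] using hc, ?_⟩
        intro c hc'; exact hcur c (List.mem_reverse.mp hc')
      · exact hacc w h
  | cons c rest ih =>
    intro cur acc hcur hacc w hw
    rw [PySem.Chars.split₀.go] at hw
    by_cases hsp : PySem.Chars.isspace c = true
    · rw [if_pos hsp] at hw
      by_cases hc : cur.isEmpty = true
      · rw [if_pos hc] at hw
        exact ih [] acc (by simp) hacc w hw
      · rw [if_neg hc] at hw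
        refine ih [] (cur.reverse :: acc) (by simp) ?_ w hw
        intro v hv
        rcases List.mem_cons.mp hv with h | h
        · subst h
          refine ⟨by simpa [List.isEmpty_iff] using hc, ?_⟩
          intro d hd; exact hcur d (List.mem_reverse.mp hd)
        · exact hacc v h
    · rw [if_neg hsp] at hw
      refine ih (c :: cur) acc ?_ hacc w hw
      intro d hd
      rcases List.mem_cons.mp hd with h | h
      · subst h; simpa using hsp
      · exact hcur d h

lemma split₀_good (u : String) : ∀ w ∈ PySem.Str.split₀ u, GoodW w := by
  intro w hw
  rcases List.mem_map.mp hw with ⟨w', hw', rfl⟩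
  have h := go_good u.toList [] [] (by simp) (by simp) w' hw'
  constructor
  · simpa using h.1
  · intro c hc
    exact h.2 c (by simpa using hc)

lemma fm_good : ∀ ts : List String, (∀ t ∈ ts, GoodW t) → ∀ w ∈ fm ts, GoodW w := by
  intro ts
  induction ts using fm.induct with
  | case1 => simp [fm]
  | case2 t => simp [fm]
  | case3 t t2 rest h ih =>
    intro hts w hw
    rw [fm, if_pos h] at hw
    rcases List.mem_cons.mp hw with h' | h'
    · subst h'
      have ht := hts t (by simp)
      refine ⟨by simp [ht.1], ?_⟩
      intro c hc
      simp only [String.toList_append] at hc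
      rcases List.mem_append.mp hc with h'' | h''
      · exact ht.2 c h''
      · have ht2 := hts t2 (by simp)
        exact ht2.2 c (List.Sublist.mem (by simpa [lstripDash] using h'') (List.dropWhile_sublist _))
    · exact ih (fun v hv => hts v (by simp at hv ⊢; tauto)) w h'
  | case4 t t2 rest h ih =>
    intro hts w hw
    rw [fm, if_neg h] at hw
    rcases List.mem_cons.mp hw with h' | h'
    · subst h'; exact hts w (by simp)
    · exact ih (fun v hv => hts v (by simp at hv ⊢; tauto)) w h'

lemma rstrip_append_space (xs : List Char) :
    PySem.Chars.rstrip (xs ++ [' ']) = PySem.Chars.rstrip xs := by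
  unfold PySem.Chars.rstrip
  rw [List.reverse_append]
  simp [show PySem.Chars.isspace ' ' = true from rfl]

lemma rstrip_of_last (ds : List Char) (c : Char) (h : PySem.Chars.isspace c = false) :
    PySem.Chars.rstrip (ds ++ [c]) = ds ++ [c] := by
  unfold PySem.Chars.rstrip
  rw [List.reverse_append]
  simp [h]

lemma lstrip_of_head (c : Char) (cs : List Char) (h : PySem.Chars.isspace c = false) :
    PySem.Chars.lstrip (c :: cs) = c :: cs := by
  unfold PySem.Chars.lstrip
  simp [h]

lemma jspL_eq (ws : List String) (hne : ws ≠ []) :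
    jspL ws = PySem.Chars.join [' '] (ws.map String.toList) ++ [' '] := by
  induction ws with
  | nil => simp at hne
  | cons w ws ih =>
    match ws with
    | [] => simp [jspL, PySem.Chars.join_singleton]
    | v :: vs =>
      rw [jspL, ih (by simp)]
      simp only [List.map_cons, PySem.Chars.join_cons_cons]
      simp

lemma join_last (ws : List String) (hne : ws ≠ []) (hg : ∀ w ∈ ws, GoodW w) :
    ∃ ds c, PySem.Chars.join [' '] (ws.map String.toList) = ds ++ [c] ∧
      PySem.Chars.isspace c = false := by
  induction ws with
  | nil => simp at hne
  | cons w ws ih =>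
    match ws with
    | [] =>
      have hw := hg w (by simp)
      rcases List.eq_nil_or_concat w.toList with h | ⟨ds, c, h⟩
      · exact absurd h hw.1
      · exact ⟨ds, c, by simp [PySem.Chars.join_singleton, h],
          hw.2 c (by simp [h])⟩
    | v :: vs =>
      rcases ih (by simp) (fun x hx => hg x (by simp at hx ⊢; tauto)) with ⟨ds, c, hds, hc⟩
      refine ⟨w.toList ++ ' ' :: ds, c, ?_, hc⟩
      simp only [List.map_cons, PySem.Chars.join_cons_cons] at hds ⊢
      simp [hds]

lemma strip_jspL (ws : List String) (hg : ∀ w ∈ ws, GoodW w) :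
    PySem.Chars.strip (jspL ws) = PySem.Chars.join [' '] (ws.map String.toList) := by
  match ws with
  | [] =>
    simp [jspL, PySem.Chars.join_nil, PySem.Chars.strip, PySem.Chars.lstrip, PySem.Chars.rstrip]
  | w :: ws' =>
    rw [jspL_eq _ (by simp)]
    rcases join_last (w :: ws') (by simp) hg with ⟨ds, c, hds, hc⟩
    have hw := hg w (by simp)
    rcases List.exists_cons_of_ne_nil hw.1 with ⟨c0, cs0, hw0⟩
    have hhead : ∃ tl, PySem.Chars.join [' '] ((w :: ws').map String.toList) = c0 :: tl := by
      match ws' with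
      | [] => exact ⟨cs0, by simp [PySem.Chars.join_singleton, hw0]⟩
      | v :: vs =>
        refine ⟨cs0 ++ ' ' :: PySem.Chars.join [' '] ((v :: vs).map String.toList), ?_⟩
        simp [PySem.Chars.join_cons_cons, hw0]
    rcases hhead with ⟨tl, htl⟩
    have hc0 : PySem.Chars.isspace c0 = false := hw.2 c0 (by simp [hw0])
    rw [PySem.Chars.strip]
    have h1 : PySem.Chars.lstrip
        (PySem.Chars.join [' '] ((w :: ws').map String.toList) ++ [' ']) =
        PySem.Chars.join [' '] ((w :: ws').map String.toList) ++ [' '] := by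
      rw [htl]
      simpa using lstrip_of_head c0 (tl ++ [' ']) hc0
    rw [h1, rstrip_append_space, hds, rstrip_of_last ds c hc]

-- ===== VERDICT (by name: the statement is the Claim_ definition above) =====
theorem join_plural_nouns_spec : Claim_equal_join_plural_nouns := by
  intro u _
  unfold Spec_join_plural_nouns join_plural_nouns join_plural_nouns_alt
  rw [bLoop_top]
  have hg : ∀ w ∈ fm (PySem.Str.split₀ u), GoodW w :=
    fm_good _ (split₀_good u)
  have hA : (aLoop (PySem.Str.split₀ u) "").toList = jspL (fm (PySem.Str.split₀ u)) := by
    simpa using aLoop_eq (PySem.Str.split₀ u) ""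
  rw [PySem.Str.strip, hA, strip_jspL _ hg, PySem.Str.join]
  have hsp : (" " : String).toList = [' '] := rfl
  rw [hsp]
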